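-- pv_equiv track=rewrite | github.com/collinsakenga/codewars_solutions | 5 kyu/Mirrored Exponential Chunks.py | mirrored_exponential_chunks
-- ===== SOURCE A (Python) =====
-- from collections import deque
--
-- def mirrored_exponential_chunks(arr):
--     if not arr:
--         return []
--     mid=len(arr)//2
--     res=deque([[arr[mid]]]) if len(arr)%2 else deque([])
--     low, high=mid, mid+1 if len(arr)%2 else mid
--     length=2
--     while low>0:
--         res.appendleft(arr[max(low-length, 0):low])
--         res.append((arr[high:min(len(arr), high+length)]))
--         low, high=low-length, high+length
--         length+=length
--     return [i for i in res]
-- ===== SOURCE B (Python) =====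
-- def mirrored_exponential_chunks(arr):
--     n = len(arr)
--     if n == 0:
--         return []
--     mid = n // 2
--     # left cut points: mid, mid-2, mid-6, ... clamped at 0, then reversed to ascend
--     lefts = [mid]
--     length = 2
--     while lefts[-1] > 0:
--         lefts.append(max(lefts[-1] - length, 0))
--         length += length
--     bounds = lefts[::-1]
--     if n % 2:
--         bounds.append(mid + 1)
--     length = 2
--     while bounds[-1] < n:
--         bounds.append(min(bounds[-1] + length, n))
--         length += length
--     return [arr[a:b] for a, b in zip(bounds, bounds[1:])]
-- ===== Notes on version B (the rewrite author's own statement) =====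
-- stated objective: alternative
-- what changed: Replaces A's interleaved deque appendleft/append construction with a two-phase boundary-table approach: first compute the ordered list of cut-point indices (left boundaries by subtracting 2,4,8,... from mid clamped at 0, the optional center boundary, right boundaries by adding 2,4,8,... clamped at len), then emit the chunks as slices between consecutive boundaries.
import Mathlib
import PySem

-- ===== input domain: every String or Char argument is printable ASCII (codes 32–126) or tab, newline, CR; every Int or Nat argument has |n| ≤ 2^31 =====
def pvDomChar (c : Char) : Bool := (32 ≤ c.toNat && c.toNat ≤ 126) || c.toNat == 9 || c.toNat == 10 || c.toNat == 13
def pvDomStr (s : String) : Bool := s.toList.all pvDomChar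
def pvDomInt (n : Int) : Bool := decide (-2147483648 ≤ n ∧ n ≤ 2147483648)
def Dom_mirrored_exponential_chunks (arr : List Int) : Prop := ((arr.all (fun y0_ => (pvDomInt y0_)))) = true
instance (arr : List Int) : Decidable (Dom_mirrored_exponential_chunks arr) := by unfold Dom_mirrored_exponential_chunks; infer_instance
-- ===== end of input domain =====

-- B replaces A's interleaved deque appendleft/append loop by computing the ordered list of
-- cut-point indices first and then slicing between consecutive boundaries (alternative decomposition, same cost).

-- ===== PORT A =====
-- the 'while low>0' loop; the extra '0 < length' conjunct only makes the recursion total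
-- (A always starts it with length = 2 and length only doubles)
def pvLoopA (arr : List Int) (n : Int) (res : List (List Int)) (low high length : Int) : List (List Int) :=
  if _h : 0 < low ∧ 0 < length then
    pvLoopA arr n
      ((PySem.List.slice arr (some (max (low - length) 0)) (some low)) ::
        (res ++ [PySem.List.slice arr (some high) (some (min n (high + length)))]))
      (low - length) (high + length) (length + length)
  else res
termination_by low.toNat
decreasing_by omega

def mirrored_exponential_chunks (arr : List Int) : List (List Int) :=
  if arr = [] then []
  else
    let n : Int := (arr.length : Int)
    let mid : Int := PySem.Int.floordiv n 2
    -- arr[mid] is always in range here (arr ≠ [] so 0 ≤ mid < n): the .getD 0 default is never taken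
    let res : List (List Int) :=
      if PySem.Int.mod n 2 ≠ 0 then [[(PySem.List.pyGet? arr mid).getD 0]] else []
    let high : Int := if PySem.Int.mod n 2 ≠ 0 then mid + 1 else mid
    pvLoopA arr n res mid high 2

-- ===== PORT B =====
-- 'while lefts[-1] > 0: lefts.append(max(lefts[-1]-length, 0))' — the current last element is carried explicitly
def pvLeftLoopB (last length : Int) (acc : List Int) : List Int :=
  if _h : 0 < last ∧ 0 < length then
    pvLeftLoopB (max (last - length) 0) (length + length) (acc ++ [max (last - length) 0])
  else acc
termination_by last.toNat
decreasing_by omega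

-- 'while bounds[-1] < n: bounds.append(min(bounds[-1]+length, n))' — the current last element is carried explicitly
def pvRightLoopB (n last length : Int) (acc : List Int) : List Int :=
  if _h : last < n ∧ 0 < length then
    pvRightLoopB n (min (last + length) n) (length + length) (acc ++ [min (last + length) n])
  else acc
termination_by (n - last).toNat
decreasing_by omega

def mirrored_exponential_chunks_alt (arr : List Int) : List (List Int) :=
  if arr = [] then []
  else
    let n : Int := (arr.length : Int)
    let mid : Int := PySem.Int.floordiv n 2
    let lefts : List Int := pvLeftLoopB mid 2 [mid]
    let bounds0 : List Int := lefts.reverse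
    let bounds1 : List Int := if PySem.Int.mod n 2 ≠ 0 then bounds0 ++ [mid + 1] else bounds0
    -- the last element of bounds1 is mid+1 (odd n) or mid (even n)
    let start : Int := if PySem.Int.mod n 2 ≠ 0 then mid + 1 else mid
    let bounds : List Int := pvRightLoopB n start 2 bounds1
    (bounds.zip bounds.tail).map (fun p => PySem.List.slice arr (some p.1) (some p.2))

-- ===== PRECONDITION & SPEC =====
def Spec_mirrored_exponential_chunks (arr : List Int) (out : List (List Int)) : Prop := out = mirrored_exponential_chunks_alt arr
instance (arr : List Int) (out : List (List Int)) : Decidable (Spec_mirrored_exponential_chunks arr out) := by unfold Spec_mirrored_exponential_chunks; infer_instance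

-- ===== CLAIM (what is proved, stated in full; the proofs are below) =====
def Claim_equal_mirrored_exponential_chunks : Prop := ∀ (arr : List Int), Dom_mirrored_exponential_chunks arr → Spec_mirrored_exponential_chunks arr (mirrored_exponential_chunks arr)

-- ===== LEMMAS AND PROOFS =====

-- slices between consecutive boundaries
def pvChunks (arr : List Int) : List Int → List (List Int)
  | a :: b :: t => PySem.List.slice arr (some a) (some b) :: pvChunks arr (b :: t)
  | _ => []

-- ascending left boundary list, ending at `low`
def pvAscL (low length : Int) : List Int :=
  if _h : 0 < low ∧ 0 < length then pvAscL (max (low - length) 0) (length + length) ++ [low] else [low]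
termination_by low.toNat
decreasing_by omega

-- ascending right boundary list, starting at `high`
def pvAscR (n high length : Int) : List Int :=
  if _h : high < n ∧ 0 < length then high :: pvAscR n (min (high + length) n) (length + length) else [high]
termination_by (n - high).toNat
decreasing_by omega

lemma pvAscL_concat (low length : Int) : ∃ Y, pvAscL low length = Y ++ [low] := by
  unfold pvAscL
  split
  · exact ⟨_, rfl⟩
  · exact ⟨[], rfl⟩

lemma pvAscR_cons (n high length : Int) : ∃ t, pvAscR n high length = high :: t := by
  unfold pvAscR
  split
  · exact ⟨_, rfl⟩
  · exact ⟨[], rfl⟩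

lemma pvChunks_split (arr : List Int) (X : List Int) (b : Int) (ys : List Int) :
    pvChunks arr (X ++ b :: ys) = pvChunks arr (X ++ [b]) ++ pvChunks arr (b :: ys) := by
  induction X with
  | nil => simp [pvChunks]
  | cons a X ih =>
    cases X with
    | nil => cases ys <;> simp [pvChunks]
    | cons c X' => simpa [pvChunks] using ih

lemma pvZip_eq_chunks (arr : List Int) (bs : List Int) :
    (bs.zip bs.tail).map (fun p => PySem.List.slice arr (some p.1) (some p.2)) = pvChunks arr bs := by
  induction bs with
  | nil => simp [pvChunks]
  | cons a bs ih =>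
    cases bs with
    | nil => simp [pvChunks]
    | cons b t => simpa [pvChunks] using ih

lemma pvChunks_single (arr : List Int) (x : Int) : pvChunks arr [x] = [] := rfl

-- chunks of the left boundary list, one step
lemma pvChunks_ascL_pos (arr : List Int) (low length : Int) (h : 0 < low) (hl : 0 < length) :
    pvChunks arr (pvAscL low length) =
      pvChunks arr (pvAscL (low - length) (length + length)) ++
        [PySem.List.slice arr (some (max (low - length) 0)) (some low)] := by
  conv_lhs => rw [pvAscL]
  rw [dif_pos ⟨h, hl⟩]
  obtain ⟨Y, hY⟩ := pvAscL_concat (max (low - length) 0) (length + length)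
  rw [hY]
  have h1 : (Y ++ [max (low - length) 0]) ++ [low] = Y ++ (max (low - length) 0) :: [low] := by simp
  rw [h1, pvChunks_split]
  by_cases hc : 0 < low - length
  · have hmx : max (low - length) 0 = low - length := by omega
    rw [hmx] at hY ⊢
    rw [← hY]
    simp [pvChunks]
  · have hm : max (low - length) 0 = 0 := by omega
    have h2 : pvAscL (low - length) (length + length) = [low - length] := by
      rw [pvAscL, dif_neg (by omega)]
    rw [hm] at hY ⊢
    have h0 : pvAscL 0 (length + length) = [0] := by rw [pvAscL, dif_neg (by omega)]
    rw [h0] at hY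
    have hYnil : Y = [] := by
      cases Y with
      | nil => rfl
      | cons y ys => exact absurd hY (by simp)
    subst hYnil
    simp [h2, pvChunks_single, pvChunks]

lemma pvChunks_ascL_nonpos (arr : List Int) (low length : Int) (h : ¬ (0 < low ∧ 0 < length)) :
    pvChunks arr (pvAscL low length) = [] := by
  rw [pvAscL, dif_neg h, pvChunks_single]

-- chunks of the right boundary list, one step
lemma pvChunks_ascR_pos (arr : List Int) (n high length : Int) (h : high < n) (hl : 0 < length) :
    pvChunks arr (pvAscR n high length) =
      PySem.List.slice arr (some high) (some (min n (high + length))) ::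
        pvChunks arr (pvAscR n (high + length) (length + length)) := by
  conv_lhs => rw [pvAscR]
  rw [dif_pos ⟨h, hl⟩]
  obtain ⟨t, ht⟩ := pvAscR_cons n (min (high + length) n) (length + length)
  rw [ht, pvChunks]
  by_cases hc : high + length < n
  · have e1 : min (high + length) n = high + length := by omega
    have e2 : min n (high + length) = high + length := by omega
    rw [e1] at ht ⊢
    rw [e2, ht]
  · have e1 : min (high + length) n = n := by omega
    have e2 : min n (high + length) = n := by omega
    have h3 : pvAscR n (high + length) (length + length) = [high + length] := by
      rw [pvAscR, dif_neg (by omega)]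
    have h4 : pvAscR n n (length + length) = [n] := by
      rw [pvAscR, dif_neg (by omega)]
    rw [e1] at ht ⊢
    have htnil : t = [] := by rw [h4] at ht; simpa using ht.symm
    subst htnil
    rw [e2]
    simp [pvChunks, h3]

lemma pvChunks_ascR_nonpos (arr : List Int) (n high length : Int) (h : ¬ (high < n ∧ 0 < length)) :
    pvChunks arr (pvAscR n high length) = [] := by
  rw [pvAscR, dif_neg h, pvChunks_single]

-- A's loop produces exactly the left chunks, then res, then the right chunks
lemma pvLoopA_eq (arr : List Int) (n : Int) :
    ∀ (res : List (List Int)) (low high length : Int), 0 < length → low + high = n →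
      pvLoopA arr n res low high length =
        pvChunks arr (pvAscL low length) ++ res ++ pvChunks arr (pvAscR n high length) := by
  intro res low high length
  fun_induction pvLoopA arr n res low high length with
  | case1 res low high length h ih =>
    intro hl hsum
    rw [ih (by omega) (by omega)]
    rw [pvChunks_ascL_pos arr low length h.1 h.2]
    rw [pvChunks_ascR_pos arr n high length (by omega) h.2]
    simp
  | case2 res low high length h =>
    intro hl hsum
    rw [pvChunks_ascL_nonpos arr low length (by tauto)]
    have : ¬ (high < n ∧ 0 < length) := by omega
    rw [pvChunks_ascR_nonpos arr n high length this]
    simp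

-- B's left loop appends exactly the reversed tail of the ascending left boundary list
lemma pvLeftLoopB_eq :
    ∀ (last length : Int) (acc : List Int),
      pvLeftLoopB last length acc = acc ++ ((pvAscL last length).reverse).tail := by
  intro last length acc
  fun_induction pvLeftLoopB last length acc with
  | case1 last length acc h ih =>
    rw [ih]
    conv_rhs => rw [pvAscL, dif_pos h]
    obtain ⟨Y, hY⟩ := pvAscL_concat (max (last - length) 0) (length + length)
    rw [hY]
    simp
  | case2 last length acc h =>
    rw [pvAscL, dif_neg h]
    simp

lemma pvRightLoopB_eq (n : Int) :
    ∀ (last length : Int) (acc : List Int),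
      pvRightLoopB n last length acc = acc ++ (pvAscR n last length).tail := by
  intro last length acc
  fun_induction pvRightLoopB n last length acc with
  | case1 last length acc h ih =>
    rw [ih]
    conv_rhs => rw [pvAscR, dif_pos h]
    obtain ⟨t, ht⟩ := pvAscR_cons n (min (last + length) n) (length + length)
    rw [ht]
    simp
  | case2 last length acc h =>
    rw [pvAscR, dif_neg h]
    simp

lemma pvBounds0_eq (mid length : Int) :
    (pvLeftLoopB mid length [mid]).reverse = pvAscL mid length := by
  rw [pvLeftLoopB_eq]
  obtain ⟨Y, hY⟩ := pvAscL_concat mid length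
  rw [hY]
  simp

-- the center slice is the singleton of arr[mid]
lemma pvCenter_slice (arr : List Int) (mid : Int) (h0 : 0 ≤ mid) (h1 : mid < (arr.length : Int)) :
    PySem.List.slice arr (some mid) (some (mid + 1)) = [(PySem.List.pyGet? arr mid).getD 0] := by
  obtain ⟨k, rfl⟩ : ∃ k : Nat, mid = (k : Int) := ⟨mid.toNat, by omega⟩
  have hk : k < arr.length := by exact_mod_cast h1
  have h1' : ((k : Int)) + 1 = ((k + 1 : Nat) : Int) := by push_cast; ring
  rw [h1', PySem.List.slice_natCast]
  have hkk : k + 1 - k = 1 := by omega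
  have hdrop : List.take 1 (List.drop k arr) = [arr[k]] := by
    rw [List.drop_eq_getElem_cons hk]; rfl
  rw [hkk, hdrop]
  simp [pysem, hk]

-- ===== VERDICT (by name: the statement is the Claim_ definition above) =====
theorem mirrored_exponential_chunks_spec : Claim_equal_mirrored_exponential_chunks := by
  intro arr _
  unfold Spec_mirrored_exponential_chunks
  by_cases hnil : arr = []
  · simp [mirrored_exponential_chunks, mirrored_exponential_chunks_alt, hnil]
  · simp only [mirrored_exponential_chunks, mirrored_exponential_chunks_alt, if_neg hnil]
    set n : Int := (arr.length : Int) with hn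
    set mid : Int := PySem.Int.floordiv n 2 with hmid
    have hnpos : 0 < n := by
      have : arr.length ≠ 0 := fun h => hnil (List.eq_nil_of_length_eq_zero h)
      omega
    have hmid' : mid = n / 2 := by rw [hmid, PySem.Int.floordiv_eq_ediv_of_pos (by norm_num)]
    have hmod : PySem.Int.mod n 2 = n % 2 := PySem.Int.mod_eq_emod_of_pos (by norm_num)
    rw [pvRightLoopB_eq, pvBounds0_eq, pvZip_eq_chunks]
    by_cases hodd : PySem.Int.mod n 2 ≠ 0
    · have hoddn : n % 2 = 1 := by rw [hmod] at hodd; omega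
      simp only [if_pos hodd]
      -- A side
      rw [pvLoopA_eq arr n _ mid (mid + 1) 2 (by norm_num) (by omega)]
      -- B side
      obtain ⟨Y, hY⟩ := pvAscL_concat mid 2
      obtain ⟨t, ht⟩ := pvAscR_cons n (mid + 1) 2
      rw [hY, ht]
      have hb : (Y ++ [mid]) ++ [mid + 1] ++ ((mid + 1) :: t).tail
          = Y ++ mid :: (mid + 1) :: t := by simp
      rw [hb, pvChunks_split arr Y mid ((mid + 1) :: t)]
      rw [show pvChunks arr (mid :: (mid + 1) :: t)
          = PySem.List.slice arr (some mid) (some (mid + 1)) :: pvChunks arr ((mid + 1) :: t) from rfl]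
      rw [← ht, ← hY]
      rw [pvCenter_slice arr mid (by omega) (by omega)]
      simp
    · simp only [if_neg hodd]
      have hevn : n % 2 = 0 := by rw [hmod] at hodd; omega
      rw [pvLoopA_eq arr n _ mid mid 2 (by norm_num) (by omega)]
      obtain ⟨Y, hY⟩ := pvAscL_concat mid 2
      obtain ⟨t, ht⟩ := pvAscR_cons n mid 2
      rw [hY, ht]
      have hb : (Y ++ [mid]) ++ (mid :: t).tail = Y ++ mid :: t := by simp
      rw [hb, pvChunks_split arr Y mid t, ← ht, ← hY]
      simp
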